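-- pv_equiv track=rewrite | github.com/benquick123/code-profiling | code/batch-2/dn7 - minolovec/M-17139-2534.py | preberi_pot
-- ===== SOURCE A (Python) =====
-- def preberi_pot(ukazi):
--     """
--     Za podani seznam ukazov (glej navodila naloge) vrni pot.
--
--     Args:
--         ukazi (str): ukazi, napisani po vrsticah
--
--     Returns:
--         list of tuple of int: pot
--     """
--
--     seznam_ukazov = ukazi.split()
--     smer = "GOR"
--     indeks_zadnje_tocke = 0
--     pot = [(0, 0)]
--
--     for ukaz in seznam_ukazov:
--         if not ukaz.isdigit():
--             if ukaz == "DESNO":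
--                 if smer == "GOR":
--                     smer = "DESNO"
--                     continue
--
--                 elif smer == "DESNO":
--                     smer = "DOL"
--                     continue
--
--                 elif smer == "DOL":
--                     smer = "LEVO"
--                     continue
--
--                 elif smer == "LEVO":
--                     smer = "GOR"
--                     continue
--
--             if ukaz == "LEVO":
--                 if smer == "GOR":
--                     smer = "LEVO"
--                     continue
--
--                 elif smer == "LEVO":
--                     smer = "DOL"
--                     continue
--
--                 elif smer == "DOL":
--                     smer = "DESNO"
--                     continue
--
--                 elif smer == "DESNO":
--                     smer = "GOR"
--                     continue
--
--         else:
--             x0 = pot[indeks_zadnje_tocke][0]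
--             y0 = pot[indeks_zadnje_tocke][1]
--
--             if smer == "GOR":
--                 pot.append((x0, y0 - int(ukaz)))
--                 indeks_zadnje_tocke = indeks_zadnje_tocke + 1
--
--             elif smer == "DOL":
--                 pot.append((x0, y0 + int(ukaz)))
--                 indeks_zadnje_tocke = indeks_zadnje_tocke + 1
--
--             elif smer == "DESNO":
--                 pot.append((x0 + int(ukaz), y0))
--                 indeks_zadnje_tocke = indeks_zadnje_tocke + 1
--
--             elif smer == "LEVO":
--                 pot.append((x0 - int(ukaz), y0))
--                 indeks_zadnje_tocke = indeks_zadnje_tocke + 1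
--
--             continue
--
--     return pot
-- ===== SOURCE B (Python) =====
-- def preberi_pot(ukazi):
--     # Stage 1: compile the token stream into a list of displacement vectors,
--     # keeping only a net right-turn counter; the heading is the closed form t % 4.
--     steps = []
--     t = 0
--     for u in ukazi.split():
--         if u.isdigit():
--             n = int(u)
--             steps.append([(0, -n), (n, 0), (0, n), (-n, 0)][t % 4])
--         elif u == "DESNO":
--             t += 1
--         elif u == "LEVO":
--             t -= 1
--     # Stage 2: path = prefix sums of the displacements.
--     pot = [(0, 0)]
--     x = y = 0
--     for dx, dy in steps:
--         x += dx
--         y += dy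
--         pot.append((x, y))
--     return pot
-- ===== Notes on version B (the rewrite author's own statement) =====
-- stated objective: alternative
-- what changed: Replaces A's one-pass four-state string machine (smer plus a hand-tracked last-point index appending directly to pot) with two staged passes: first compile the tokens into a list of displacement vectors using only a net right-turn counter and the closed-form heading table indexed by t mod 4, then build the path as prefix sums of that list.
import Mathlib
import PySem

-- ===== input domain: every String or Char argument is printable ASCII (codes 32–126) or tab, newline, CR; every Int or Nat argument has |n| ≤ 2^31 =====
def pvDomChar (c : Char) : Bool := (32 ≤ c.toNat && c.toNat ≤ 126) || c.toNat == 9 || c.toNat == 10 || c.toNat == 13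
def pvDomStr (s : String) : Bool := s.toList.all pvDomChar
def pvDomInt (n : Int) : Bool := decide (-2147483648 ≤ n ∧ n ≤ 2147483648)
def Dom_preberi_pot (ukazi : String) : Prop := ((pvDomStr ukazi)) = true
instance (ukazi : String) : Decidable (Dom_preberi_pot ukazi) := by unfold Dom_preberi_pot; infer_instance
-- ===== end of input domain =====

-- B replaces A's one-pass four-state string machine with two staged passes: tokens → displacement
-- vectors (heading = closed form of a net turn counter mod 4), then prefix sums (alternative; same cost).

-- ===== PORT A =====
-- A's loop: state is (smer, indeks_zadnje_tocke, pot); literal transliteration of the dispatch order.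
def pvALoop : List String → String → Int → List (Int × Int) → List (Int × Int)
  | [], _, _, pot => pot
  | ukaz :: rest, smer, idx, pot =>
    if ¬ (PySem.Str.strIsdigit ukaz) then
      -- `if ukaz == "DESNO": …` with the four `smer` cases, each `continue`
      if ukaz == "DESNO" ∧ smer == "GOR" then pvALoop rest "DESNO" idx pot
      else if ukaz == "DESNO" ∧ smer == "DESNO" then pvALoop rest "DOL" idx pot
      else if ukaz == "DESNO" ∧ smer == "DOL" then pvALoop rest "LEVO" idx pot
      else if ukaz == "DESNO" ∧ smer == "LEVO" then pvALoop rest "GOR" idx pot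
      -- fall through to `if ukaz == "LEVO": …`
      else if ukaz == "LEVO" ∧ smer == "GOR" then pvALoop rest "LEVO" idx pot
      else if ukaz == "LEVO" ∧ smer == "LEVO" then pvALoop rest "DOL" idx pot
      else if ukaz == "LEVO" ∧ smer == "DOL" then pvALoop rest "DESNO" idx pot
      else if ukaz == "LEVO" ∧ smer == "DESNO" then pvALoop rest "GOR" idx pot
      else pvALoop rest smer idx pot
    else
      -- pot[indeks_zadnje_tocke][0], [1]; int(ukaz) never fails on a digit-token (getD guard for totality only)
      let x0 := (PySem.List.pyGetD pot idx (0, 0)).1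
      let y0 := (PySem.List.pyGetD pot idx (0, 0)).2
      let n := (PySem.Int.ofStr? ukaz).getD 0
      if smer == "GOR" then pvALoop rest smer (idx + 1) (pot ++ [(x0, y0 - n)])
      else if smer == "DOL" then pvALoop rest smer (idx + 1) (pot ++ [(x0, y0 + n)])
      else if smer == "DESNO" then pvALoop rest smer (idx + 1) (pot ++ [(x0 + n, y0)])
      else if smer == "LEVO" then pvALoop rest smer (idx + 1) (pot ++ [(x0 - n, y0)])
      else pvALoop rest smer idx pot

def preberi_pot (ukazi : String) : List (Int × Int) :=
  pvALoop (PySem.Str.split₀ ukazi) "GOR" 0 [(0, 0)]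

-- ===== PORT B =====
-- B stage 1: tokens → displacement vectors; state is only the net right-turn counter t.
-- `[(0,-n),(n,0),(0,n),(-n,0)][t % 4]`: t % 4 ∈ [0,4) always, getD guard for totality only.
def pvSteps : List String → Int → List (Int × Int)
  | [], _ => []
  | u :: rest, t =>
    if PySem.Str.strIsdigit u then
      let n := (PySem.Int.ofStr? u).getD 0
      PySem.List.pyGetD [((0 : Int), -n), (n, 0), (0, n), (-n, 0)] (PySem.Int.mod t 4) (0, 0)
        :: pvSteps rest t
    else if u == "DESNO" then pvSteps rest (t + 1)
    else if u == "LEVO" then pvSteps rest (t - 1)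
    else pvSteps rest t

-- B stage 2: prefix sums of the displacements, appended to pot.
def pvAcc : List (Int × Int) → Int → Int → List (Int × Int) → List (Int × Int)
  | [], _, _, pot => pot
  | (dx, dy) :: rest, x, y, pot => pvAcc rest (x + dx) (y + dy) (pot ++ [(x + dx, y + dy)])

def preberi_pot_alt (ukazi : String) : List (Int × Int) :=
  pvAcc (pvSteps (PySem.Str.split₀ ukazi) 0) 0 0 [(0, 0)]

-- ===== PRECONDITION & SPEC =====
def Spec_preberi_pot (ukazi : String) (out : List (Int × Int)) : Prop := out = preberi_pot_alt ukazi
instance (ukazi : String) (out : List (Int × Int)) : Decidable (Spec_preberi_pot ukazi out) := by unfold Spec_preberi_pot; infer_instance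

-- ===== CLAIM (what is proved, stated in full; the proofs are below) =====
def Claim_equal_preberi_pot : Prop := ∀ (ukazi : String), Dom_preberi_pot ukazi → Spec_preberi_pot ukazi (preberi_pot ukazi)

-- ===== LEMMAS AND PROOFS =====

-- the correspondence between A's smer strings and B's turn counter mod 4
def pvDirOK (smer : String) (t : Int) : Prop :=
  (smer = "GOR" ∧ PySem.Int.mod t 4 = 0) ∨ (smer = "DESNO" ∧ PySem.Int.mod t 4 = 1) ∨
  (smer = "DOL" ∧ PySem.Int.mod t 4 = 2) ∨ (smer = "LEVO" ∧ PySem.Int.mod t 4 = 3)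

lemma pvLoop_eq (toks : List String) : ∀ (smer : String) (t idx x y : Int)
    (pot : List (Int × Int)) (hne : pot ≠ []) (hidx : idx = (pot.length : Int) - 1)
    (hlast : pot.getLast? = some (x, y)) (hdir : pvDirOK smer t),
    pvALoop toks smer idx pot = pvAcc (pvSteps toks t) x y pot := by
  induction toks with
  | nil => intro _ _ _ _ _ _ _ _ _ _; rfl
  | cons ukaz rest ih =>
    intro smer t idx x y pot hne hidx hlast hdir
    have h1 : 0 < pot.length := List.length_pos_iff.mpr hne
    have hget : PySem.List.pyGetD pot idx (0, 0) = (x, y) := by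
      have h3 : pot[idx.toNat]? = some (x, y) := by
        rw [← hlast, List.getLast?_eq_getElem?]
        congr 1
        omega
      rw [PySem.List.pyGetD_eq_getElem pot (0, 0) (by omega) (by omega)]
      rwa [List.getElem?_eq_getElem (by omega), Option.some.injEq] at h3
    have hmodconv : PySem.Int.mod t 4 = t % 4 := PySem.Int.mod_eq_emod_of_pos (by norm_num)
    have hmodconv1 : PySem.Int.mod (t + 1) 4 = (t + 1) % 4 := PySem.Int.mod_eq_emod_of_pos (by norm_num)
    have hmodconv2 : PySem.Int.mod (t - 1) 4 = (t - 1) % 4 := PySem.Int.mod_eq_emod_of_pos (by norm_num)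
    by_cases hd : PySem.Str.strIsdigit ukaz
    · -- digit token: both sides append one point and recurse with the direction unchanged
      rcases hdir with ⟨hs, hm⟩ | ⟨hs, hm⟩ | ⟨hs, hm⟩ | ⟨hs, hm⟩ <;> subst hs <;>
        simp only [pvALoop, pvSteps, hd, hm, hget, Bool.not_true, not_true_eq_false, if_false,
          beq_self_eq_true, if_true, reduceIte, String.reduceBEq, Bool.false_eq_true] <;>
        generalize (PySem.Int.ofStr? ukaz).getD 0 = c
      · rw [show PySem.List.pyGetD [((0 : Int), -c), (c, 0), (0, c), (-c, 0)] 0 (0, 0)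
              = ((0 : Int), -c) from rfl]
        simp only [pvAcc]
        rw [ih "GOR" t (idx + 1) x (y - c) (pot ++ [(x, y - c)]) (by simp)
            (by simp only [List.length_append, List.length_cons, List.length_nil]; push_cast; omega)
            List.getLast?_concat (Or.inl ⟨rfl, hm⟩)]
        ring_nf
      · rw [show PySem.List.pyGetD [((0 : Int), -c), (c, 0), (0, c), (-c, 0)] 1 (0, 0)
              = (c, (0 : Int)) from rfl]
        simp only [pvAcc]
        rw [ih "DESNO" t (idx + 1) (x + c) y (pot ++ [(x + c, y)]) (by simp)
            (by simp only [List.length_append, List.length_cons, List.length_nil]; push_cast; omega)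
            List.getLast?_concat (Or.inr (Or.inl ⟨rfl, hm⟩))]
        ring_nf
      · rw [show PySem.List.pyGetD [((0 : Int), -c), (c, 0), (0, c), (-c, 0)] 2 (0, 0)
              = ((0 : Int), c) from rfl]
        simp only [pvAcc]
        rw [ih "DOL" t (idx + 1) x (y + c) (pot ++ [(x, y + c)]) (by simp)
            (by simp only [List.length_append, List.length_cons, List.length_nil]; push_cast; omega)
            List.getLast?_concat (Or.inr (Or.inr (Or.inl ⟨rfl, hm⟩)))]
        ring_nf
      · rw [show PySem.List.pyGetD [((0 : Int), -c), (c, 0), (0, c), (-c, 0)] 3 (0, 0)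
              = (-c, (0 : Int)) from rfl]
        simp only [pvAcc]
        rw [ih "LEVO" t (idx + 1) (x - c) y (pot ++ [(x - c, y)]) (by simp)
            (by simp only [List.length_append, List.length_cons, List.length_nil]; push_cast; omega)
            List.getLast?_concat (Or.inr (Or.inr (Or.inr ⟨rfl, hm⟩)))]
        ring_nf
    · -- non-digit token: recursion with updated (or unchanged) direction state
      rw [Bool.not_eq_true] at hd
      by_cases hD : ukaz = "DESNO"
      · subst hD
        rcases hdir with ⟨hs, hm⟩ | ⟨hs, hm⟩ | ⟨hs, hm⟩ | ⟨hs, hm⟩ <;> subst hs <;>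
          rw [hmodconv] at hm <;>
          simp only [pvALoop, pvSteps, hd, beq_self_eq_true, beq_iff_eq, String.reduceEq,
            and_self, and_false, false_and, and_true, true_and, not_true_eq_false,
            not_false_eq_true, reduceIte, Bool.false_eq_true, if_true, if_false] <;>
          refine ih _ _ _ _ _ _ hne hidx hlast ?_ <;> unfold pvDirOK
        · exact Or.inr (Or.inl ⟨rfl, by rw [hmodconv1]; omega⟩)
        · exact Or.inr (Or.inr (Or.inl ⟨rfl, by rw [hmodconv1]; omega⟩))
        · exact Or.inr (Or.inr (Or.inr ⟨rfl, by rw [hmodconv1]; omega⟩))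
        · exact Or.inl ⟨rfl, by rw [hmodconv1]; omega⟩
      · by_cases hL : ukaz = "LEVO"
        · subst hL
          rcases hdir with ⟨hs, hm⟩ | ⟨hs, hm⟩ | ⟨hs, hm⟩ | ⟨hs, hm⟩ <;> subst hs <;>
            rw [hmodconv] at hm <;>
            simp only [pvALoop, pvSteps, hd, beq_self_eq_true, beq_iff_eq, String.reduceEq,
              and_self, and_false, false_and, and_true, true_and, not_true_eq_false,
              not_false_eq_true, reduceIte, Bool.false_eq_true, if_true, if_false] <;>
            refine ih _ _ _ _ _ _ hne hidx hlast ?_ <;> unfold pvDirOK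
          · exact Or.inr (Or.inr (Or.inr ⟨rfl, by rw [hmodconv2]; omega⟩))
          · exact Or.inl ⟨rfl, by rw [hmodconv2]; omega⟩
          · exact Or.inr (Or.inl ⟨rfl, by rw [hmodconv2]; omega⟩)
          · exact Or.inr (Or.inr (Or.inl ⟨rfl, by rw [hmodconv2]; omega⟩))
        · -- unrecognized token: both sides ignore it
          have hA : pvALoop (ukaz :: rest) smer idx pot = pvALoop rest smer idx pot := by
            simp only [pvALoop, hd, beq_iff_eq, hD, hL, false_and, and_false, if_false,
              reduceIte, Bool.false_eq_true, not_false_eq_true, if_true]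
          have hB : pvSteps (ukaz :: rest) t = pvSteps rest t := by
            simp only [pvSteps, hd, beq_iff_eq, hD, hL, if_false, reduceIte,
              Bool.false_eq_true]
          rw [hA, hB]
          exact ih _ _ _ _ _ _ hne hidx hlast hdir

-- ===== VERDICT (by name: the statement is the Claim_ definition above) =====
theorem preberi_pot_spec : Claim_equal_preberi_pot := by
  intro ukazi _
  unfold Spec_preberi_pot preberi_pot preberi_pot_alt
  exact pvLoop_eq _ "GOR" 0 0 0 0 [(0, 0)] (by simp) (by simp) rfl
    (by unfold pvDirOK; exact Or.inl ⟨rfl, by decide⟩)
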